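-- pv_equiv track=rewrite | github.com/o9-9/discord-tool-copy-cord | code/admin/standalone_scraper.py | _tail_run_len
-- ===== SOURCE A (Python) =====
-- def _tail_run_len(s: str) -> int:
--     if not s:
--         return 0
--     last = s[-1]
--     n = 0
--     for i in range(len(s) - 1, -1, -1):
--         if s[i] == last:
--             n += 1
--         else:
--             break
--     return n
-- ===== SOURCE B (Python) =====
-- def _tail_run_len(s: str) -> int:
--     # Single forward pass: maintain the length of the current trailing run.
--     n = 0
--     prev = None
--     for c in s:
--         n = n + 1 if c == prev else 1
--         prev = c
--     return n
-- ===== Notes on version B (the rewrite author's own statement) =====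
-- stated objective: alternative
-- what changed: Replaces the backward index scan with break by a single forward pass that maintains the current run length, resetting it whenever the character changes.
import Mathlib
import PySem

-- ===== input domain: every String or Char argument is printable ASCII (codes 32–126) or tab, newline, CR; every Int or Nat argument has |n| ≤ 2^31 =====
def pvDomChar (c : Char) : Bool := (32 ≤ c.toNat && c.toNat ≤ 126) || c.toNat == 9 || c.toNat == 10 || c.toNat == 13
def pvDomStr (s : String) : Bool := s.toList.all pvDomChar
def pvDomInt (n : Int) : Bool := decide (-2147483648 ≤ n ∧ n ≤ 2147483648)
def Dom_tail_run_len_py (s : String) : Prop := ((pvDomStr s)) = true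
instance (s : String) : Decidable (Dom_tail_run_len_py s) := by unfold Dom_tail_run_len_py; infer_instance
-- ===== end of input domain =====

-- Alternative implementation: forward single pass maintaining the current run length (A scans backward with break); return values agree on all strings.

-- ===== PORT A =====
-- helper: the for-loop over range(len(s)-1, -1, -1) with its break
def pvLoopA (l : List Char) (last : Char) : List Int → Int → Int
  | [], n => n
  | i :: rest, n =>
    match PySem.List.pyGet? l i with
    | some c => if c == last then pvLoopA l last rest (n + 1) else n
    | none => n  -- unreachable: every index produced by the range is in bounds

def tail_run_len_py (s : String) : Int :=
  if s.toList = [] then 0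
  else
    match PySem.List.pyGet? s.toList (-1) with
    | some last =>
        pvLoopA s.toList last
          (PySem.List.pyRange ((s.toList.length : Int) - 1) (-1) (-1)) 0
    | none => 0  -- unreachable: s is nonempty, so s[-1] exists

-- ===== PORT B =====
def tail_run_len_py_alt (s : String) : Int :=
  (s.toList.foldl
    (fun (st : Int × Option Char) c =>
      (if some c == st.2 then st.1 + 1 else 1, some c))
    ((0 : Int), (none : Option Char))).1

-- ===== PRECONDITION & SPEC =====
def Spec_tail_run_len_py (s : String) (out : Int) : Prop := out = tail_run_len_py_alt s
instance (s : String) (out : Int) : Decidable (Spec_tail_run_len_py s out) := by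
  unfold Spec_tail_run_len_py; infer_instance

-- ===== CLAIM =====
def Claim_equal_tail_run_len_py : Prop :=
  ∀ (s : String), Dom_tail_run_len_py s → Spec_tail_run_len_py s (tail_run_len_py s)

-- ===== LEMMAS AND PROOFS =====
-- length (as an Int) of the run of characters equal to `c` at the head of `r`
def pvCnt (c : Char) : List Char → Int
  | [] => 0
  | x :: t => if x == c then 1 + pvCnt c t else 0

def pvTrl (l : List Char) : Int :=
  match l.reverse.head? with
  | none => 0
  | some x => pvCnt x l.reverse

lemma pvCnt_cons (c x : Char) (t : List Char) :
    pvCnt c (x :: t) = if x == c then 1 + pvCnt c t else 0 := rfl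

lemma pvCnt_head (x c : Char) (t : List Char) :
    pvCnt c (x :: t) = if x == c then pvCnt x (x :: t) else 0 := by
  by_cases h : x == c
  · have : x = c := by simpa using h
    subst this; simp [pvCnt]
  · simp [pvCnt, h]

lemma pvLoopA_range (l : List Char) (last : Char) :
    ∀ (k : Nat), k < l.length → ∀ (n : Int),
      pvLoopA l last (PySem.List.pyRange (k : Int) (-1) (-1)) n
        = n + pvCnt last ((l.take (k + 1)).reverse) := by
  intro k
  induction k with
  | zero =>
    intro hk n
    rw [show ((0 : Nat) : Int) = 0 from rfl,
        PySem.List.pyRange_neg_one_cons (by omega),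
        PySem.List.pyRange_neg_one_eq_nil (by omega)]
    have h0 : PySem.List.pyGet? l 0 = some l[0] := by
      rw [PySem.List.pyGet?_zero]; exact List.getElem?_eq_getElem hk
    have ht : l.take 1 = [l[0]] := by
      cases l with
      | nil => simp at hk
      | cons a t => simp
    simp only [pvLoopA, h0, ht]
    by_cases h : l[0] == last
    · simp [pvCnt, h]
    · simp [pvCnt, h]
  | succ k ih =>
    intro hk n
    have hcast : ((k + 1 : Nat) : Int) = (k : Int) + 1 := by push_cast; ring
    rw [hcast, PySem.List.pyRange_neg_one_cons (by omega)]
    have hget : PySem.List.pyGet? l ((k : Int) + 1) = some l[k + 1] := by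
      rw [← hcast, PySem.List.pyGet?_natCast]
      exact List.getElem?_eq_getElem hk
    have htake : l.take (k + 1 + 1) = l.take (k + 1) ++ [l[k + 1]] := by
      rw [List.take_add_one]
      simp [List.getElem?_eq_getElem hk]
    have hsimp : ((k : Int) + 1 - 1) = (k : Int) := by ring
    simp only [pvLoopA, hget, hsimp]
    by_cases h : l[k + 1] == last
    · rw [if_pos h, ih (by omega) (n + 1), htake, List.reverse_append,
        List.reverse_singleton, List.singleton_append, pvCnt_cons, if_pos h]
      ring
    · rw [if_neg h, htake, List.reverse_append, List.reverse_singleton,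
        List.singleton_append, pvCnt_cons, if_neg h]
      ring

lemma pvFoldB (l : List Char) :
    l.foldl
      (fun (st : Int × Option Char) c =>
        (if some c == st.2 then st.1 + 1 else 1, some c))
      ((0 : Int), (none : Option Char))
      = (pvTrl l, l.reverse.head?) := by
  induction l using List.reverseRecOn with
  | nil => simp [pvTrl]
  | append_singleton l c ih =>
    rw [List.foldl_append, ih]
    simp only [List.foldl_cons, List.foldl_nil, List.reverse_append,
      List.reverse_cons, List.reverse_nil, List.nil_append, List.cons_append,
      List.head?_cons, Prod.mk.injEq]
    refine ⟨?_, trivial⟩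
    have hTrlC : pvTrl (l ++ [c]) = 1 + pvCnt c l.reverse := by
      simp [pvTrl, pvCnt]
    rw [hTrlC]
    cases hr : l.reverse with
    | nil => simp [pvCnt]
    | cons x t =>
      have htrl : pvTrl l = pvCnt x (x :: t) := by simp [pvTrl, hr]
      rw [List.head?_cons, pvCnt_head x c t]
      by_cases h : x = c
      · subst h
        rw [if_pos (by simp), if_pos (by simp), htrl]; ring
      · rw [if_neg (by simp [Ne.symm h]), if_neg (by simp [h])]
        norm_num

-- ===== VERDICT =====
theorem tail_run_len_py_spec : Claim_equal_tail_run_len_py := by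
  intro s _
  unfold Spec_tail_run_len_py tail_run_len_py tail_run_len_py_alt
  rw [pvFoldB]
  cases hl : s.toList with
  | nil => simp [pvTrl]
  | cons a t =>
    rw [if_neg (by simp), PySem.List.pyGet?_neg_one]
    cases hr : (a :: t).reverse with
    | nil => simp at hr
    | cons x r =>
      have hx : (a :: t).getLast? = some x := by
        rw [← List.head?_reverse, hr]; rfl
      rw [hx]
      show pvLoopA (a :: t) x
        (PySem.List.pyRange (((a :: t).length : Int) - 1) (-1) (-1)) 0
          = pvTrl (a :: t)
      have hlen : (((a :: t).length : Nat) : Int) - 1 = ((t.length : Nat) : Int) := by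
        push_cast [List.length_cons]; ring
      rw [hlen, pvLoopA_range (a :: t) x t.length (by simp) 0,
        show (a :: t).take (t.length + 1) = a :: t from
          List.take_of_length_le (by simp)]
      simp [pvTrl, hr]
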